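-- pv_equiv track=rewrite | github.com/isk02206/python | informatics/previous informatics/Infomatics-1/7/keyboard.py | rowKey
-- ===== SOURCE A (Python) =====
-- def rowKey(char, keyboard = 'QWERTYUIOP|ASDFGHJKL|ZXCVBNM'):
--
--     char = char.upper()
--     keyboard = keyboard.upper()
--     #lower case�� �ٲܼ� �ִ�
--
--     row = 1
--
--     for x in keyboard:
--         #while roof�� �ٲܼ� �ִ�
--
--         if x == '|':
--             row += 1
--
--         elif x == char:
--             return row
-- ===== SOURCE B (Python) =====
-- def rowKey(char, keyboard = 'QWERTYUIOP|ASDFGHJKL|ZXCVBNM'):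
--     char = char.upper()
--     for i, row in enumerate(keyboard.upper().split('|'), 1):
--         if char in set(row):
--             return i
--     return None
-- ===== Notes on version B (the rewrite author's own statement) =====
-- stated objective: simpler
-- what changed: B splits the keyboard into row strings once and returns the 1-based index of the first row whose character set contains the (uppercased) char, instead of A's per-character scan with a separator-counting row state machine.
import Mathlib
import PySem

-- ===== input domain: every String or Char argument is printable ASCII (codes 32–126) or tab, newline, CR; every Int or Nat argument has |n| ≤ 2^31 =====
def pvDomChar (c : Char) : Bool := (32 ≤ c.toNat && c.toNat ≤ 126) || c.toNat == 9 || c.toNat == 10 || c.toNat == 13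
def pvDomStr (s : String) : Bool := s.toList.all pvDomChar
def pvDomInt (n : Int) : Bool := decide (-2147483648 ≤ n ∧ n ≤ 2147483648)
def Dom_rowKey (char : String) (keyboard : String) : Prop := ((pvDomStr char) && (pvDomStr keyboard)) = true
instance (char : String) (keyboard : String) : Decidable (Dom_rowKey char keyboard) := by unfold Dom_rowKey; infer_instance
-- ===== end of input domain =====

-- B splits the keyboard on '|' into row strings once and searches for the first row
-- containing the uppercased character (objective: simpler decomposition, same cost).


-- ===== PORT A =====
-- A's loop: scan the uppercased keyboard character by character, '|' bumps the row
-- counter, a character equal to the (uppercased) char returns the current row.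
def rowKeyLoopA (cu : String) : List Char → Int → Option Int
  | [], _ => none
  | x :: xs, row =>
    if x = '|' then rowKeyLoopA cu xs (row + 1)
    else if String.ofList [x] = cu then some row
    else rowKeyLoopA cu xs row

def rowKey (char : String) (keyboard : String) : Option Int :=
  rowKeyLoopA (PySem.Str.upper char) (PySem.Str.upper keyboard).toList 1

-- ===== PORT B =====
-- hand port of Python str.split(sep) for the nonempty single-char separator '|':
-- exact (''.split('|') = [''], trailing separator yields a trailing empty piece).
def rowKeySplit : List Char → List (List Char)
  | [] => [[]]
  | c :: cs =>
    if c = '|' then [] :: rowKeySplit cs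
    else
      match rowKeySplit cs with
      | [] => [[c]]
      | r :: rs => (c :: r) :: rs

-- Source B's enumerate(rows, 1) loop: first row whose set of 1-char strings contains char.
def rowKeyLoopB (cu : String) : List (List Char) → Int → Option Int
  | [], _ => none
  | r :: rs, i =>
    if PySem.Set.contains (PySem.Set.ofList (r.map (fun c => String.ofList [c]))) cu then some i
    else rowKeyLoopB cu rs (i + 1)

def rowKey_alt (char : String) (keyboard : String) : Option Int :=
  rowKeyLoopB (PySem.Str.upper char) (rowKeySplit (PySem.Str.upper keyboard).toList) 1

-- ===== PRECONDITION & SPEC =====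
def Spec_rowKey (char : String) (keyboard : String) (out : Option Int) : Prop := out = rowKey_alt char keyboard
instance (char : String) (keyboard : String) (out : Option Int) : Decidable (Spec_rowKey char keyboard out) := by unfold Spec_rowKey; infer_instance

-- ===== CLAIM (what is proved, stated in full; the proofs are below) =====
def Claim_equal_rowKey : Prop := ∀ (char : String) (keyboard : String), Dom_rowKey char keyboard → Spec_rowKey char keyboard (rowKey char keyboard)

-- ===== LEMMAS AND PROOFS =====
theorem rowKeySplit_ne_nil (l : List Char) : rowKeySplit l ≠ [] := by
  cases l with
  | nil => simp [rowKeySplit]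
  | cons c cs =>
    simp only [rowKeySplit]
    split_ifs
    · simp
    · cases h : rowKeySplit cs <;> simp

theorem rowKeyLoop_eq (cu : String) (l : List Char) :
    ∀ row : Int, rowKeyLoopA cu l row = rowKeyLoopB cu (rowKeySplit l) row := by
  induction l with
  | nil =>
    intro row
    simp [rowKeyLoopA, rowKeySplit, rowKeyLoopB, PySem.Set.contains]
  | cons c cs ih =>
    intro row
    by_cases hc : c = '|'
    · simp only [rowKeyLoopA, rowKeySplit, hc, if_true]
      rw [ih (row + 1)]
      simp [rowKeyLoopB, PySem.Set.contains]
    · obtain ⟨r, rs, hr⟩ : ∃ r rs, rowKeySplit cs = r :: rs := by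
        cases h : rowKeySplit cs with
        | nil => exact absurd h (rowKeySplit_ne_nil cs)
        | cons r rs => exact ⟨r, rs, rfl⟩
      simp only [rowKeySplit, if_neg hc, hr]
      have hB : rowKeyLoopA cu cs row = rowKeyLoopB cu (r :: rs) row := by rw [ih row, hr]
      by_cases he : String.ofList [c] = cu
      · simp [rowKeyLoopA, rowKeyLoopB, if_neg hc, he, PySem.Set.contains,
          PySem.Set.mem_ofList]
      · simp only [rowKeyLoopA, if_neg hc, if_neg he, hB]
        simp only [rowKeyLoopB, List.map_cons]
        congr 1
        simp [PySem.Set.contains, PySem.Set.mem_ofList]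
        intro h'
        exact absurd h'.symm he

-- ===== VERDICT (by name: the statement is the Claim_ definition above) =====
theorem rowKey_spec : Claim_equal_rowKey := by
  intro char keyboard _
  unfold Spec_rowKey rowKey rowKey_alt
  exact rowKeyLoop_eq _ _ _
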